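-- pv_equiv track=rewrite | github.com/churdstheword/adventofcode2020 | day3/solution.py | calculate
-- ===== SOURCE A (Python) =====
-- def getPositionValue(position, lines):
--     line = lines[position[1]].rstrip()
--     return line[position[0] % len(line)]
--
-- def translate(vector1, vector2):
--     sum = []
--     for i in range(len(vector1)):
--         sum.append(vector1[i] + vector2[i])
--     return sum
--
-- def calculate(lines, velocity):
--     position = [0, 0]
--     count = 0
--     while position[1] < len(lines):
--         # Check the tile value based on the current position
--         if getPositionValue(position, lines) == '#':
--             count += 1
--         # Traverse according to our movement vector
--         position = translate(position, velocity)
--     return count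
-- ===== SOURCE B (Python) =====
-- def calculate(lines, velocity):
--     vx, vy = velocity[0], velocity[1]
--     count = 0
--     for i, line in enumerate(lines[::vy]):
--         row = line.rstrip()
--         if row[(i * vx) % len(row)] == '#':
--             count += 1
--     return count
-- ===== Notes on version B (the rewrite author's own statement) =====
-- stated objective: simpler
-- what changed: Replaces the while-loop with a mutable position vector and the translate helper by slicing every velocity[1]-th row (lines[::vy]) and deriving the column of the i-th visited row directly as i*vx % len(row), counting '#' in a single enumerate loop.
-- outside the precondition, e.g. on calculate([], []): A returns 0, B raises IndexError; on calculate([], [1, 0]): A returns 0, B raises ValueError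
import Mathlib
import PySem

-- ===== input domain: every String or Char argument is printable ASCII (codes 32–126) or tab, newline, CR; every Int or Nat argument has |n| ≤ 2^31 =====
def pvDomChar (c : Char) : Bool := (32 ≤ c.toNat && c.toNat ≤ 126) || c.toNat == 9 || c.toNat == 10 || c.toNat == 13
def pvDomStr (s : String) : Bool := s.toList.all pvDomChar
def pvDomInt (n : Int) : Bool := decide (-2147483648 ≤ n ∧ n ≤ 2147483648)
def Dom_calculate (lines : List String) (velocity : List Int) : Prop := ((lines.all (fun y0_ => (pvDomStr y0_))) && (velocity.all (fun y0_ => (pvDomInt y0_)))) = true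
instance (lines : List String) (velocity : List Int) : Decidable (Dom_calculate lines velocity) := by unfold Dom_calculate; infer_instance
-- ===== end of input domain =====

-- B replaces A's while-loop with a mutable position and the translate helper by slicing
-- every velocity[1]-th row and computing the i-th visited column as i*vx % len(row) (simpler decomposition).

-- ===== PORT A =====
-- getPositionValue(position, lines); none = where Python raises (IndexError / ZeroDivisionError)
def pvGetPositionValue? (position : List Int) (lines : List String) : Option Char :=
  match PySem.List.pyGet? lines (PySem.List.pyGetD position 1 0) with
  | none => none
  | some s =>
    let line := (PySem.Str.rstrip s).toList
    match PySem.Int.mod? (PySem.List.pyGetD position 0 0) ((line.length : Int)) with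
    | none => none
    | some k => PySem.List.pyGet? line k

-- translate(vector1, vector2)
def pvTranslate (vector1 vector2 : List Int) : List Int :=
  (List.range vector1.length).foldl
    (fun sum i => sum ++ [PySem.List.pyGetD vector1 (i : Int) 0 + PySem.List.pyGetD vector2 (i : Int) 0]) []

-- the while loop; fuel is only a totality guard (y strictly increases by velocity[1] ≥ 1 inside Pre_,
-- so lines.length + 1 steps always suffice there)
def pvCalcLoop (lines : List String) (velocity : List Int) : Nat → List Int → Int → Int
  | 0, _, count => count
  | fuel + 1, position, count =>
    if PySem.List.pyGetD position 1 0 < (lines.length : Int) then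
      pvCalcLoop lines velocity fuel (pvTranslate position velocity)
        (if pvGetPositionValue? position lines = some '#' then count + 1 else count)
    else count

def calculate (lines : List String) (velocity : List Int) : Int :=
  pvCalcLoop lines velocity (lines.length + 1) [0, 0] 0

-- ===== PORT B =====
def calculate_alt (lines : List String) (velocity : List Int) : Int :=
  let vx := PySem.List.pyGetD velocity 0 0
  let vy := PySem.List.pyGetD velocity 1 0
  match PySem.List.slice? lines none none vy with
  | none => 0
  | some rows =>
    (PySem.List.enumerate rows).foldl
      (fun count p =>
        let row := (PySem.Str.rstrip p.2).toList
        match PySem.Int.mod? (p.1 * vx) ((row.length : Int)) with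
        | none => count
        | some k => if PySem.List.pyGet? row k = some '#' then count + 1 else count) 0

-- ===== PRECONDITION & SPEC =====
-- Pre_ excludes velocity vectors with fewer than 2 components and non-positive vertical steps
-- (A raises or loops forever there except when lines = [], where A returns 0 and B raises — see cites),
-- and inputs where a visited row is blank after rstrip (A raises ZeroDivisionError there).
def Pre_calculate (lines : List String) (velocity : List Int) : Prop :=
  2 ≤ velocity.length ∧ 0 < PySem.List.pyGetD velocity 1 0 ∧
  ∀ i : Nat, i < lines.length → (PySem.List.pyGetD velocity 1 0) ∣ (i : Int) →
    (PySem.Str.rstrip (lines.getD i "")).toList ≠ []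
instance (lines : List String) (velocity : List Int) : Decidable (Pre_calculate lines velocity) := by
  unfold Pre_calculate; infer_instance

def pvWitness_calculate : List String × List Int := (["#.#", "..#", "#.."], [3, 1])

def Spec_calculate (lines : List String) (velocity : List Int) (out : Int) : Prop := out = calculate_alt lines velocity
instance (lines : List String) (velocity : List Int) (out : Int) : Decidable (Spec_calculate lines velocity out) := by unfold Spec_calculate; infer_instance

-- ===== CLAIM (what is proved, stated in full; the proofs are below) =====
def Claim_equal_calculate : Prop := ∀ (lines : List String) (velocity : List Int), Dom_calculate lines velocity → Pre_calculate lines velocity → Spec_calculate lines velocity (calculate lines velocity)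


-- ===== LEMMAS AND PROOFS =====

-- the shared per-visited-row step: row k of the path reads lines[k*vy] and column k*vx
def pvStep (lines : List String) (vx vy : Int) (count : Int) (k : Nat) : Int :=
  let row := (PySem.Str.rstrip (lines.getD ((k : Int) * vy).toNat "")).toList
  match PySem.Int.mod? ((k : Int) * vx) ((row.length : Int)) with
  | none => count
  | some j => if PySem.List.pyGet? row j = some '#' then count + 1 else count

lemma pv_filterMap_eq_map {a b : Type} (l : List a) (f : a -> Option b) (g : a -> b)
    (h : forall x, x ∈ l -> f x = some (g x)) : l.filterMap f = l.map g := by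
  induction l with
  | nil => rfl
  | cons x t ih =>
    simp only [List.filterMap_cons, h x (by simp), List.map_cons]
    rw [ih (fun y hy => h y (by simp [hy]))]

lemma pv_enumerate_snoc {a : Type} (xs : List a) (x : a) (s : Int) :
    PySem.List.enumerate (xs ++ [x]) s
      = PySem.List.enumerate xs s ++ [((s + xs.length : Int), x)] := by
  induction xs generalizing s with
  | nil => simp [PySem.List.enumerate_cons, PySem.List.enumerate_nil]
  | cons y t ih =>
    simp only [List.cons_append, PySem.List.enumerate_cons, ih, List.length_cons]
    push_cast
    ring_nf

lemma pv_enum_map_range {a : Type} (g : Nat -> a) (F : Int -> a -> Int -> Int) (n : Nat) :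
    (PySem.List.enumerate ((List.range n).map g)).foldl (fun c p => F p.1 p.2 c) 0
      = (List.range n).foldl (fun c (k : Nat) => F (k : Int) (g k) c) 0 := by
  induction n with
  | zero => simp [PySem.List.enumerate_nil]
  | succ m ih =>
    rw [List.range_succ, List.map_append, List.map_singleton, pv_enumerate_snoc,
      List.foldl_append, List.foldl_append, ih]
    simp

lemma pv_lt_div (N : Nat) (vy : Int) (hvy : 0 < vy) (k : Nat) :
    ((k : Int) < ((N : Int) + vy - 1) / vy) ↔ (k : Int) * vy < (N : Int) := by
  rw [Int.lt_iff_add_one_le, Int.le_ediv_iff_mul_le hvy]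
  constructor <;> intro h <;> nlinarith

lemma pv_div_le (N : Nat) (vy : Int) (hvy : 0 < vy) :
    ((N : Int) + vy - 1) / vy ≤ (N : Int) := by
  by_contra h
  rw [not_le, Int.lt_iff_add_one_le, Int.le_ediv_iff_mul_le hvy] at h
  have hN : (0 : Int) ≤ (N : Int) := Int.natCast_nonneg N
  nlinarith

lemma pv_div_nonneg (N : Nat) (vy : Int) (hvy : 0 < vy) :
    0 ≤ ((N : Int) + vy - 1) / vy :=
  Int.ediv_nonneg (by have := Int.natCast_nonneg N; omega) hvy.le

-- pyGetD on a literal pair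
lemma pv_pyGetD_pair0 (x y d : Int) : PySem.List.pyGetD [x, y] 0 d = x := rfl
lemma pv_pyGetD_pair1 (x y d : Int) : PySem.List.pyGetD [x, y] 1 d = y := rfl

lemma pv_translate_pair (x y : Int) (v : List Int) :
    pvTranslate [x, y] v
      = [x + PySem.List.pyGetD v 0 0, y + PySem.List.pyGetD v 1 0] := by
  simp [pvTranslate, List.range_succ, pv_pyGetD_pair1]

-- A's body at position [k*vx, k*vy] is exactly pvStep
lemma pv_step_eq (lines : List String) (vx vy : Int) (k : Nat) (c : Int)
    (hpos : 0 ≤ (k : Int) * vy) (h : ((k : Int) * vy).toNat < lines.length) :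
    (if pvGetPositionValue? [(k : Int) * vx, (k : Int) * vy] lines = some '#' then c + 1 else c)
      = pvStep lines vx vy c k := by
  unfold pvGetPositionValue? pvStep
  simp only [pv_pyGetD_pair1, pv_pyGetD_pair0, PySem.List.pyGet?_of_nonneg lines hpos,
    List.getElem?_eq_getElem h, List.getD_eq_getElem lines "" h]
  rcases PySem.Int.mod? ((k : Int) * vx)
      (((PySem.Str.rstrip lines[((k : Int) * vy).toNat]).toList.length : Int)) with _ | j <;>
    simp

-- A's loop, started at step k of the path, folds pvStep over the remaining visited indices
lemma pvA_loop (lines : List String) (velocity : List Int)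
    (hvy : 0 < PySem.List.pyGetD velocity 1 0) :
    ∀ (d k fuel : Nat) (c : Int),
      ((((lines.length : Int) + PySem.List.pyGetD velocity 1 0 - 1)
        / PySem.List.pyGetD velocity 1 0).toNat) ≤ k + d -> d < fuel ->
      pvCalcLoop lines velocity fuel
        [(k : Int) * PySem.List.pyGetD velocity 0 0,
         (k : Int) * PySem.List.pyGetD velocity 1 0] c
        = (List.range' k
            ((((lines.length : Int) + PySem.List.pyGetD velocity 1 0 - 1)
              / PySem.List.pyGetD velocity 1 0).toNat - k)).foldl
            (pvStep lines (PySem.List.pyGetD velocity 0 0) (PySem.List.pyGetD velocity 1 0)) c := by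
  set vx := PySem.List.pyGetD velocity 0 0 with hvx
  set vy := PySem.List.pyGetD velocity 1 0 with hvydef
  set q := (((lines.length : Int) + vy - 1) / vy) with hq
  have hq0 : 0 ≤ q := pv_div_nonneg lines.length vy hvy
  intro d
  induction d with
  | zero =>
    intro k fuel c hk hf
    obtain ⟨f, rfl⟩ : ∃ f, fuel = f + 1 := ⟨fuel - 1, by omega⟩
    have hnot : ¬ ((k : Int) * vy < (lines.length : Int)) := by
      rw [← pv_lt_div lines.length vy hvy, ← hq]
      omega
    simp [pvCalcLoop, pv_pyGetD_pair1, hnot, Nat.sub_eq_zero_of_le (by omega : q.toNat ≤ k)]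
  | succ d ih =>
    intro k fuel c hk hf
    obtain ⟨f, rfl⟩ : ∃ f, fuel = f + 1 := ⟨fuel - 1, by omega⟩
    by_cases hlt : (k : Int) < q
    · have hklt : (k : Int) * vy < (lines.length : Int) := by
        rw [← pv_lt_div lines.length vy hvy, ← hq]; exact hlt
      have hpos : 0 ≤ (k : Int) * vy :=
        mul_nonneg (Int.natCast_nonneg k) hvy.le
      have hrange : q.toNat - k = (q.toNat - (k + 1)) + 1 := by omega
      simp only [pvCalcLoop, pv_pyGetD_pair1, hklt, if_pos, pv_translate_pair]
      have harg : [(k : Int) * vx + vx, (k : Int) * vy + vy]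
          = [((k + 1 : Nat) : Int) * vx, ((k + 1 : Nat) : Int) * vy] := by
        push_cast; ring_nf
      rw [pv_step_eq lines vx vy k c hpos (by omega), harg,
        ih (k + 1) f _ (by omega) (by omega), hrange, List.range'_succ, List.foldl_cons]
    · have hnot : ¬ ((k : Int) * vy < (lines.length : Int)) := by
        rw [← pv_lt_div lines.length vy hvy, ← hq]; exact fun h => hlt h
      simp [pvCalcLoop, pv_pyGetD_pair1, hnot, Nat.sub_eq_zero_of_le (by omega : q.toNat ≤ k)]

lemma pvB_eq (lines : List String) (velocity : List Int)
    (hvy : 0 < PySem.List.pyGetD velocity 1 0) :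
    calculate_alt lines velocity
      = (List.range ((((lines.length : Int) + PySem.List.pyGetD velocity 1 0 - 1)
          / PySem.List.pyGetD velocity 1 0).toNat)).foldl
          (pvStep lines (PySem.List.pyGetD velocity 0 0) (PySem.List.pyGetD velocity 1 0)) 0 := by
  set vx := PySem.List.pyGetD velocity 0 0 with hvx
  set vy := PySem.List.pyGetD velocity 1 0 with hvydef
  set q := (((lines.length : Int) + vy - 1) / vy) with hq
  have hq0 : 0 ≤ q := pv_div_nonneg lines.length vy hvy
  have hslice : PySem.List.slice? lines none none vy
      = some ((List.range q.toNat).filterMap (fun (k : Nat) => lines[(vy * (k : Int)).toNat]?)) := by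
    simp only [PySem.List.slice?, PySem.List.sliceIndices, if_neg hvy.ne',
      if_neg (not_lt.mpr hvy.le), if_pos hvy, Option.some.injEq]
    by_cases hN : 0 < lines.length
    · simp [hN, hq]
    · have h0 : lines.length = 0 := by omega
      simp [h0]
  have hmap : (List.range q.toNat).filterMap (fun (k : Nat) => lines[(vy * (k : Int)).toNat]?)
      = (List.range q.toNat).map (fun (k : Nat) => lines.getD ((k : Int) * vy).toNat "") := by
    apply pv_filterMap_eq_map
    intro k hk
    rw [List.mem_range] at hk
    have hk' : (k : Int) < q := by omega
    have hlt : (k : Int) * vy < (lines.length : Int) := by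
      rw [← pv_lt_div lines.length vy hvy, ← hq]; exact hk'
    have hpos : 0 ≤ (k : Int) * vy := mul_nonneg (Int.natCast_nonneg k) hvy.le
    have hn : ((k : Int) * vy).toNat < lines.length := by omega
    rw [mul_comm vy ((k : Int)), List.getElem?_eq_getElem hn, List.getD_eq_getElem lines "" hn]
  simp only [calculate_alt]
  rw [← hvx, ← hvydef, hslice, hmap]
  show (PySem.List.enumerate ((List.range q.toNat).map
      (fun (k : Nat) => lines.getD ((k : Int) * vy).toNat ""))).foldl _ 0 = _
  rw [pv_enum_map_range (g := fun (k : Nat) => lines.getD ((k : Int) * vy).toNat "")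
    (F := fun i s c =>
      match PySem.Int.mod? (i * vx) (((PySem.Str.rstrip s).toList.length : Int)) with
      | none => c
      | some j => if PySem.List.pyGet? ((PySem.Str.rstrip s).toList) j = some '#' then c + 1
        else c)]
  rfl

theorem pv_main (lines : List String) (velocity : List Int)
    (hvy : 0 < PySem.List.pyGetD velocity 1 0) :
    calculate lines velocity = calculate_alt lines velocity := by
  have hq0 : 0 ≤ (((lines.length : Int) + PySem.List.pyGetD velocity 1 0 - 1)
      / PySem.List.pyGetD velocity 1 0) :=
    pv_div_nonneg lines.length _ hvy
  have hqle : (((lines.length : Int) + PySem.List.pyGetD velocity 1 0 - 1)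
      / PySem.List.pyGetD velocity 1 0) ≤ (lines.length : Int) :=
    pv_div_le lines.length _ hvy
  have hstart : ([0, 0] : List Int)
      = [((0 : Nat) : Int) * PySem.List.pyGetD velocity 0 0,
         ((0 : Nat) : Int) * PySem.List.pyGetD velocity 1 0] := by norm_num
  unfold calculate
  rw [hstart, pvA_loop lines velocity hvy
      ((((lines.length : Int) + PySem.List.pyGetD velocity 1 0 - 1)
        / PySem.List.pyGetD velocity 1 0).toNat) 0 (lines.length + 1) 0
      (by omega) (by omega),
    pvB_eq lines velocity hvy, Nat.sub_zero, ← List.range_eq_range']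

-- ===== VERDICT (by name: the statement is the Claim_ definition above) =====
theorem calculate_spec : Claim_equal_calculate := by
  intro lines velocity _ hpre
  unfold Spec_calculate
  exact pv_main lines velocity hpre.2.1
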